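-- pv_equiv track=rewrite | github.com/naved001/xdmod-openshift-scripts | openshift_metrics/metrics_processor.py | insert_pod_labels
-- ===== SOURCE A (Python) =====
-- def insert_pod_labels(pod_labels: list, resource_request_metrics: list) -> list:
--     """Inserts `label_nerc_mghpcc_org_class` label into resource_request_metrics"""
--     pod_label_dict = {}
--     for pod_label in pod_labels:
--         pod_name = pod_label["metric"]["pod"]
--         class_name = pod_label["metric"].get("label_nerc_mghpcc_org_class")
--         pod_label_dict[pod_name] = {"pod": pod_name, "class": class_name}
--
--     for pod in resource_request_metrics:
--         pod_name = pod["metric"]["pod"]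
--         if pod_name not in pod_label_dict:
--             continue
--         pod["metric"]["label_nerc_mghpcc_org_class"] = pod_label_dict[pod_name].get(
--             "class"
--         )
--     return resource_request_metrics
-- ===== SOURCE B (Python) =====
-- def insert_pod_labels(pod_labels: list, resource_request_metrics: list) -> list:
--     """Inserts `label_nerc_mghpcc_org_class` label into resource_request_metrics.
--
--     No precomputed dict: for each pod, scan pod_labels in REVERSE and stop at the
--     first matching entry (which is the last match in original order, mirroring
--     dict last-wins semantics); assign its class label (possibly None).
--     Mutates the pod dicts in place, like the original.
--     """
--     for pod in resource_request_metrics: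
--         name = pod["metric"]["pod"]
--         for pod_label in reversed(pod_labels):
--             if pod_label["metric"]["pod"] == name:
--                 pod["metric"]["label_nerc_mghpcc_org_class"] = \
--                     pod_label["metric"].get("label_nerc_mghpcc_org_class")
--                 break
--     return resource_request_metrics
-- ===== Notes on version B (the rewrite author's own statement) =====
-- stated objective: alternative
-- what changed: Replaces A's precomputed pod->class dict plus lookup with a direct reverse-scan join: for each pod, scan pod_labels from the back and stop at the first matching entry (equals A's dict last-wins), assigning its class in place.
import Mathlib
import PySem

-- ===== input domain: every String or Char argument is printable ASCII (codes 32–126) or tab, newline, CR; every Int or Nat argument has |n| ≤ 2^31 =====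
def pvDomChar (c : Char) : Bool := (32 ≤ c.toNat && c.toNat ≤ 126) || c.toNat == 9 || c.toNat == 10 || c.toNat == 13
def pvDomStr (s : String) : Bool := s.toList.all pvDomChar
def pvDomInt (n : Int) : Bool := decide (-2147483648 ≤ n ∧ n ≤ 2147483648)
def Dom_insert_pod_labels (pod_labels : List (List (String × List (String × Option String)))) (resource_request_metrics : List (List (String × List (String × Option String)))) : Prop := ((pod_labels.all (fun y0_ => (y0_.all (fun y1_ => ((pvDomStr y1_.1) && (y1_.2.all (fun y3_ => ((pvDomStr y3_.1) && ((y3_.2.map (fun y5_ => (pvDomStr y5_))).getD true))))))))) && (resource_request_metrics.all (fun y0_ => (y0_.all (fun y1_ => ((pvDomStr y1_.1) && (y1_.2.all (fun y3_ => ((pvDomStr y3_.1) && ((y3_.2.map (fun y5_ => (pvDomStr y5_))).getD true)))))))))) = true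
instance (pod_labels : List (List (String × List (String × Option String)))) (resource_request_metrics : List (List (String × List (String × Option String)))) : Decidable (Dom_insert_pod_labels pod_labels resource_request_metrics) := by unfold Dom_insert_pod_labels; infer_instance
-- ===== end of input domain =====

-- ===== PORT A =====
-- B drops A's precomputed pod->class dict and instead scans pod_labels in reverse, stopping
-- at the first match (= A's dict last-wins). Both Pythons mutate the pod dicts in place and
-- return the same list; the equivalence proved here is about the returned value.

-- helper for A: one iteration of the dict-building loop (`pod_label_dict[pod_name] = {...}`)
def pvStepA (d : PySem.Dict (Option String) (Option String × Option String))
    (pod_label : List (String × List (String × Option String))) :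
    PySem.Dict (Option String) (Option String × Option String) :=
  match (PySem.Dict.mk pod_label).get? "metric" with
  | none => d   -- Python raises KeyError here; excluded by Pre_
  | some m =>
    match (PySem.Dict.mk m).get? "pod" with
    | none => d   -- KeyError; excluded by Pre_
    | some pod_name =>
      let class_name := (PySem.Dict.mk m).getD "label_nerc_mghpcc_org_class" none
      d.insert pod_name (pod_name, class_name)

def insert_pod_labels (pod_labels : List (List (String × List (String × Option String)))) (resource_request_metrics : List (List (String × List (String × Option String)))) : List (List (String × List (String × Option String))) :=
  let pod_label_dict := pod_labels.foldl pvStepA PySem.Dict.empty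
  resource_request_metrics.map (fun pod =>
    match (PySem.Dict.mk pod).get? "metric" with
    | none => pod   -- KeyError; excluded by Pre_
    | some m =>
      match (PySem.Dict.mk m).get? "pod" with
      | none => pod   -- KeyError; excluded by Pre_
      | some pod_name =>
        match pod_label_dict.get? pod_name with
        | none => pod   -- `continue`
        | some v =>      -- v.2 = pod_label_dict[pod_name].get("class")
          ((PySem.Dict.mk pod).insert "metric"
            ((PySem.Dict.mk m).insert "label_nerc_mghpcc_org_class" v.2).items).items)

-- ===== PORT B =====
-- helper for B: the reverse scan `for pod_label in reversed(pod_labels): … break`,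
-- applied to an already-reversed list; returns the first match's class (possibly none).
def pvFindB (name : Option String) :
    List (List (String × List (String × Option String))) → Option (Option String)
  | [] => none
  | pod_label :: rest =>
    match (PySem.Dict.mk pod_label).get? "metric" with
    | none => pvFindB name rest   -- Python raises KeyError here; excluded by Pre_
    | some m =>
      match (PySem.Dict.mk m).get? "pod" with
      | none => pvFindB name rest   -- KeyError; excluded by Pre_
      | some pn =>
        if pn == name then some ((PySem.Dict.mk m).getD "label_nerc_mghpcc_org_class" none)
        else pvFindB name rest

-- helper for B: process one pod of the outer loop
def pvUpdateB (pod_labels : List (List (String × List (String × Option String))))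
    (pod : List (String × List (String × Option String))) :
    List (String × List (String × Option String)) :=
  match (PySem.Dict.mk pod).get? "metric" with
  | none => pod   -- KeyError; excluded by Pre_
  | some m =>
    match (PySem.Dict.mk m).get? "pod" with
    | none => pod   -- KeyError; excluded by Pre_
    | some name =>
      match pvFindB name pod_labels.reverse with
      | none => pod   -- no matching label entry: pod left untouched
      | some class_name =>
        ((PySem.Dict.mk pod).insert "metric"
          ((PySem.Dict.mk m).insert "label_nerc_mghpcc_org_class" class_name).items).items

def insert_pod_labels_alt (pod_labels : List (List (String × List (String × Option String)))) (resource_request_metrics : List (List (String × List (String × Option String)))) : List (List (String × List (String × Option String))) :=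
  match resource_request_metrics with
  | [] => []
  | pod :: rest => pvUpdateB pod_labels pod :: insert_pod_labels_alt pod_labels rest

-- ===== PRECONDITION & SPEC =====
-- Pre_ excludes exactly the inputs on which A raises KeyError: an entry (in either list)
-- whose dict has no "metric" key, or whose "metric" dict has no "pod" key.
def Pre_insert_pod_labels (pod_labels : List (List (String × List (String × Option String)))) (resource_request_metrics : List (List (String × List (String × Option String)))) : Prop :=
  ∀ e ∈ pod_labels ++ resource_request_metrics,
    (((PySem.Dict.mk e).get? "metric").bind (fun m => (PySem.Dict.mk m).get? "pod")).isSome = true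
instance (pod_labels : List (List (String × List (String × Option String)))) (resource_request_metrics : List (List (String × List (String × Option String)))) : Decidable (Pre_insert_pod_labels pod_labels resource_request_metrics) := by unfold Pre_insert_pod_labels; infer_instance
def pvWitness_insert_pod_labels : (List (List (String × List (String × Option String)))) × (List (List (String × List (String × Option String)))) :=
  ([[("metric", [("pod", some "a"), ("label_nerc_mghpcc_org_class", some "c1")])],
    [("metric", [("pod", some "a")])]],
   [[("metric", [("pod", some "a"), ("cpu", none)])],
    [("metric", [("pod", some "z")])]])

def Spec_insert_pod_labels (pod_labels : List (List (String × List (String × Option String)))) (resource_request_metrics : List (List (String × List (String × Option String)))) (out : List (List (String × List (String × Option String)))) : Prop := out = insert_pod_labels_alt pod_labels resource_request_metrics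
instance (pod_labels : List (List (String × List (String × Option String)))) (resource_request_metrics : List (List (String × List (String × Option String)))) (out : List (List (String × List (String × Option String)))) : Decidable (Spec_insert_pod_labels pod_labels resource_request_metrics out) := by unfold Spec_insert_pod_labels; infer_instance

-- ===== CLAIM (what is proved, stated in full; the proofs are below) =====
def Claim_equal_insert_pod_labels : Prop := ∀ (pod_labels : List (List (String × List (String × Option String)))) (resource_request_metrics : List (List (String × List (String × Option String)))), Dom_insert_pod_labels pod_labels resource_request_metrics → Pre_insert_pod_labels pod_labels resource_request_metrics → Spec_insert_pod_labels pod_labels resource_request_metrics (insert_pod_labels pod_labels resource_request_metrics)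

-- ===== LEMMAS AND PROOFS =====

-- first-match scan distributes over append
theorem pvFindB_append (name : Option String)
    (xs ys : List (List (String × List (String × Option String)))) :
    pvFindB name (xs ++ ys) =
      match pvFindB name xs with
      | some c => some c
      | none => pvFindB name ys := by
  induction xs with
  | nil => simp [pvFindB]
  | cons x tl ih =>
    simp only [List.cons_append, pvFindB]
    cases (PySem.Dict.mk x).get? "metric" with
    | none => exact ih
    | some m =>
      dsimp only
      cases (PySem.Dict.mk m).get? "pod" with
      | none => exact ih
      | some pn =>
        dsimp only
        by_cases h : pn == name
        · simp [h]
        · simp only [h]; exact ih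

-- Invariant: A's dict fold, queried at one key, equals B's reverse first-match scan
-- (falling back to the initial dict when no entry matches).
theorem pvFold_find (pls : List (List (String × List (String × Option String))))
    (name : Option String) :
    ∀ (d : PySem.Dict (Option String) (Option String × Option String)),
    (pls.foldl pvStepA d).get? name =
      match pvFindB name pls.reverse with
      | some c => some (name, c)
      | none => d.get? name := by
  induction pls with
  | nil => intro d; simp [pvFindB]
  | cons pl tl ih =>
    intro d
    simp only [List.foldl_cons, List.reverse_cons, pvFindB_append]
    rw [ih]
    cases hfind : pvFindB name tl.reverse with
    | some c => rfl
    | none =>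
      dsimp only
      unfold pvStepA pvFindB
      cases (PySem.Dict.mk pl).get? "metric" with
      | none => simp [pvFindB]
      | some m =>
        dsimp only
        cases (PySem.Dict.mk m).get? "pod" with
        | none => simp [pvFindB]
        | some pn =>
          dsimp only
          by_cases h : pn = name
          · subst h
            simp [PySem.Dict.get?_insert_self]
          · have hbe : (pn == name) = false := by simpa using h
            have hne : name ≠ pn := fun hh => h hh.symm
            simp [pvFindB, hbe, PySem.Dict.get?_insert_of_ne d _ hne]

-- ===== VERDICT (by name: the statement is the Claim_ definition above) =====
theorem insert_pod_labels_spec : Claim_equal_insert_pod_labels := by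
  intro pod_labels resource_request_metrics hdom hpre
  clear hdom hpre
  unfold Spec_insert_pod_labels insert_pod_labels
  induction resource_request_metrics with
  | nil => rfl
  | cons pod rest ih =>
    simp only [List.map_cons, insert_pod_labels_alt]
    refine congrArg₂ _ ?_ ih
    unfold pvUpdateB
    cases hm : (PySem.Dict.mk pod).get? "metric" with
    | none => rfl
    | some m =>
      dsimp only
      cases hp : (PySem.Dict.mk m).get? "pod" with
      | none => rfl
      | some name =>
        dsimp only
        rw [pvFold_find pod_labels name PySem.Dict.empty]
        cases pvFindB name pod_labels.reverse with
        | none => simp [PySem.Dict.get?_empty]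
        | some c => rfl
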